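-- pv_equiv track=rewrite | github.com/sandra86code/Programacion1 | Boletin7/ejercicio07.py | calculaMayor
-- ===== SOURCE A (Python) =====
-- def calculaMayor(lista):
--     mayor=lista[0]
--     repeticion=0
--     for i in range (1,len(lista)):
--         if lista[i]>mayor:
--             mayor=lista[i]
--
--     for i in range(len(lista)):
--         if lista[i]==mayor:
--             repeticion+=1
--
--     return [mayor, repeticion]
-- ===== SOURCE B (Python) =====
-- def calculaMayor(lista):
--     mayor = lista[0]
--     repeticion = 1
--     for x in lista[1:]:
--         if x > mayor:
--             mayor = x
--             repeticion = 1
--         elif x == mayor: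
--             repeticion += 1
--     return [mayor, repeticion]
-- ===== Notes on version B (the rewrite author's own statement) =====
-- stated objective: alternative
-- what changed: Replaced A's two index-based passes (find max, then count it) by one pass over the tail that maintains the max and its count together, resetting the count to 1 whenever a new max appears.
import Mathlib
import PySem

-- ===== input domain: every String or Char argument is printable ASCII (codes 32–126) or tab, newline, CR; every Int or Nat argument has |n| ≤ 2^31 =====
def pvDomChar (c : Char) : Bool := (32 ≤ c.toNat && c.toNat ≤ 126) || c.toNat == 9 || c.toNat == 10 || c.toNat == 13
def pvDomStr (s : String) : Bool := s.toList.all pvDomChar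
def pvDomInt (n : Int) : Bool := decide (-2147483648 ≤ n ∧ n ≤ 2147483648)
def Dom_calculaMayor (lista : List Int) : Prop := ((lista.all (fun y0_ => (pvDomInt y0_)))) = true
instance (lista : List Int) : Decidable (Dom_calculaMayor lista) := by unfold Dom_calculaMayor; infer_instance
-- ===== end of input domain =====

-- B replaces A's two index-based passes (find max, then count it) by one pass over the tail maintaining (max, count) together.

-- ===== PORT A =====
def calculaMayor (lista : List Int) : List Int :=
  let mayor := PySem.List.pyGetD lista 0 0      -- lista[0]; the empty list (IndexError) is excluded by Pre_
  let mayor := (PySem.List.pyRange 1 (PySem.List.len lista) 1).foldl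
    (fun m i => if PySem.List.pyGetD lista i 0 > m then PySem.List.pyGetD lista i 0 else m) mayor
  let repeticion := (PySem.List.pyRange 0 (PySem.List.len lista) 1).foldl
    (fun r i => if PySem.List.pyGetD lista i 0 = mayor then r + 1 else r) (0 : Int)
  [mayor, repeticion]

-- ===== PORT B =====
def calculaMayor_alt (lista : List Int) : List Int :=
  let st := (PySem.List.slice lista (some 1) none).foldl
    (fun (p : Int × Int) x =>
      if x > p.1 then (x, 1)
      else if x = p.1 then (p.1, p.2 + 1)
      else p)
    (PySem.List.pyGetD lista 0 0, 1)
  [st.1, st.2]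

-- ===== PRECONDITION & SPEC =====
-- Pre_ excludes only the empty list, on which both Pythons raise IndexError at lista[0].
def Pre_calculaMayor (lista : List Int) : Prop := lista ≠ []
instance (lista : List Int) : Decidable (Pre_calculaMayor lista) := by unfold Pre_calculaMayor; infer_instance
def pvWitness_calculaMayor : List Int := [3, 1, 3]
def Spec_calculaMayor (lista : List Int) (out : List Int) : Prop := out = calculaMayor_alt lista
instance (lista : List Int) (out : List Int) : Decidable (Spec_calculaMayor lista out) := by unfold Spec_calculaMayor; infer_instance

-- ===== CLAIM (what is proved, stated in full; the proofs are below) =====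
def Claim_equal_calculaMayor : Prop := ∀ (lista : List Int), Dom_calculaMayor lista → Pre_calculaMayor lista → Spec_calculaMayor lista (calculaMayor lista)

-- ===== LEMMAS AND PROOFS =====

-- A's first pass, as a fold over the tail: running maximum
def pvMaxf (m : Int) (t : List Int) : Int :=
  t.foldl (fun a x => if x > a then x else a) m

-- B's fold step, named for the proofs (definitionally equal to the lambda in the port)
def pvStepB (p : Int × Int) (x : Int) : Int × Int :=
  if x > p.1 then (x, 1) else if x = p.1 then (p.1, p.2 + 1) else p

lemma pvMaxf_cons (m x : Int) (t : List Int) :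
    pvMaxf m (x :: t) = pvMaxf (if x > m then x else m) t := by
  simp [pvMaxf]

lemma pvMaxf_le (t : List Int) : ∀ m : Int, m ≤ pvMaxf m t := by
  induction t with
  | nil => intro m; simp [pvMaxf]
  | cons x t ih =>
    intro m
    rw [pvMaxf_cons]
    by_cases h : x > m
    · rw [if_pos h]; exact le_trans (le_of_lt h) (ih x)
    · rw [if_neg h]; exact ih m

-- A's counting fold equals countP with an arbitrary accumulator
lemma pvCount_fold (M : Int) (t : List Int) : ∀ c : Int,
    t.foldl (fun r x => if x = M then r + 1 else r) c = c + (t.countP (fun x => x == M) : Int) := by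
  induction t with
  | nil => intro c; simp
  | cons x t ih =>
    intro c
    rw [List.foldl_cons, List.countP_cons]
    by_cases h : x = M
    · rw [if_pos h, ih]
      simp [h]; ring
    · have hb : (x == M) = false := by simp [h]
      rw [if_neg h, ih, hb]
      simp

-- B's single-pass invariant: the fold computes the running max and the count of the max
lemma pvB_inv (t : List Int) : ∀ (m c : Int),
    t.foldl pvStepB (m, c)
      = (pvMaxf m t,
         (if pvMaxf m t = m then c else 0) + (t.countP (fun x => x == pvMaxf m t) : Int)) := by
  induction t with
  | nil => intro m c; simp [pvMaxf]
  | cons x t ih =>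
    intro m c
    have hM := pvMaxf_le t
    rw [List.foldl_cons, pvMaxf_cons, List.countP_cons]
    by_cases h1 : x > m
    · rw [if_pos h1]
      have hs : pvStepB (m, c) x = (x, 1) := by simp only [pvStepB, if_pos h1]
      rw [hs, ih x 1]
      have hxle := hM x
      have hne : pvMaxf x t ≠ m := by omega
      rw [if_neg hne]
      by_cases hx : pvMaxf x t = x
      · have hb : (x == pvMaxf x t) = true := by simp [hx]
        rw [if_pos hx, hb]
        simp; ring
      · have hb : (x == pvMaxf x t) = false := by
          simp only [beq_eq_false_iff_ne, ne_eq]; omega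
        rw [if_neg hx, hb]
        simp
    · rw [if_neg h1]
      by_cases h2 : x = m
      · have hs : pvStepB (m, c) x = (m, c + 1) := by
          simp only [pvStepB]; rw [if_neg h1, if_pos h2]
        rw [hs, ih m (c + 1), h2]
        by_cases hMm : pvMaxf m t = m
        · have hb : (m == pvMaxf m t) = true := by simp [hMm]
          rw [if_pos hMm, if_pos hMm, hb]
          simp; ring
        · have hb : (m == pvMaxf m t) = false := by
            simp only [beq_eq_false_iff_ne, ne_eq]
            intro hc; exact hMm hc.symm
          rw [if_neg hMm, if_neg hMm, hb]
          simp
      · have hs : pvStepB (m, c) x = (m, c) := by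
          simp only [pvStepB]; rw [if_neg h1, if_neg h2]
        rw [hs, ih m c]
        have hmle := hM m
        have hb : (x == pvMaxf m t) = false := by
          simp only [beq_eq_false_iff_ne, ne_eq]; omega
        rw [hb]
        simp

-- ===== VERDICT (by name: the statement is the Claim_ definition above) =====
theorem calculaMayor_spec : Claim_equal_calculaMayor := by
  intro lista _ hpre
  obtain ⟨h, t, rfl⟩ : ∃ h t, lista = h :: t := by
    cases lista with
    | nil => exact absurd rfl hpre
    | cons h t => exact ⟨h, t, rfl⟩
  simp only [Spec_calculaMayor, calculaMayor, calculaMayor_alt]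
  rw [PySem.List.slice_from_one, List.tail_cons]
  have hget : PySem.List.pyGetD (h :: t) 0 0 = h := by
    simp [PySem.List.pyGetD, PySem.List.pyGet?, PySem.List.pyIdx?]
  rw [hget]
  -- first pass of A = pvMaxf h t
  have e1 := PySem.List.foldl_pyRange_pyGetD (h :: t) (0 : Int)
      (fun m v => if v > m then v else m) h (a := 1) (by norm_num)
  simp only [] at e1
  have hdrop : (h :: t).drop ((1 : Int).toNat) = t := by simp
  rw [hdrop] at e1
  rw [e1]
  have maxeq : ∀ (m : Int) (l : List Int),
      l.foldl (fun a x => if x > a then x else a) m = pvMaxf m l := fun _ _ => rfl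
  rw [maxeq]
  -- second pass of A = counting fold over the whole list
  have e2 := PySem.List.foldl_pyRange_zero_pyGetD (h :: t) (0 : Int)
      (fun r v => if v = pvMaxf h t then r + 1 else r) (0 : Int)
  simp only [] at e2
  rw [e2, pvCount_fold (pvMaxf h t) (h :: t) 0]
  -- B's fold
  have stepeq : ∀ (init : Int × Int) (l : List Int),
      l.foldl (fun (p : Int × Int) x =>
        if x > p.1 then (x, 1) else if x = p.1 then (p.1, p.2 + 1) else p) init
      = l.foldl pvStepB init := fun _ _ => rfl
  rw [stepeq, pvB_inv t h 1]
  rw [List.countP_cons]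
  have hle := pvMaxf_le t h
  by_cases hm : pvMaxf h t = h
  · have hb : (h == pvMaxf h t) = true := by simp [hm]
    rw [hb, if_pos hm]
    simp; ring
  · have hb : (h == pvMaxf h t) = false := by
      simp only [beq_eq_false_iff_ne, ne_eq]
      intro hc; exact hm hc.symm
    rw [hb, if_neg hm]
    simp
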